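-- pv_equiv track=rewrite | github.com/diederikwp/aoc19 | days/day10.py | group_asteroids_by_direction
-- ===== SOURCE A (Python) =====
-- import math
-- from collections import namedtuple, defaultdict
--
-- Direction = namedtuple('Direction', ['dx', 'dy'])
--
-- def group_asteroids_by_direction(asteroids, view_point_idx):
--     x_self, y_self = asteroids[view_point_idx]
--     asteroids_by_direction = defaultdict(list)
--
--     for idx, (x_other, y_other) in enumerate(asteroids):
--         if idx == view_point_idx:
--             continue
--
--         dx = x_other - x_self
--         dy = y_other - y_self
--         if dx == 0:
--             dy = dy // abs(dy)
--         elif dy == 0: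
--             dx = dx // abs(dx)
--         else:
--             div = math.gcd(dx, dy)
--             dx //= div
--             dy //= div
--
--         asteroids_by_direction[Direction(dx, dy)].append(asteroids[idx])
--
--     return asteroids_by_direction
-- ===== SOURCE B (Python) =====
-- import math
--
-- def group_asteroids_by_direction(asteroids, view_point_idx):
--     x_self, y_self = asteroids[view_point_idx]
--     pairs = []
--     for idx, (x_other, y_other) in enumerate(asteroids):
--         if idx == view_point_idx:
--             continue
--         dx = x_other - x_self
--         dy = y_other - y_self
--         g = math.gcd(dx, dy)  # uniform normalization; g = 0 only for a coincident asteroid (then // raises, as A does)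
--         pairs.append(((dx // g, dy // g), (x_other, y_other)))
--     keys = list(dict.fromkeys(k for k, _ in pairs))
--     return {k: [a for k2, a in pairs if k2 == k] for k in keys}
-- ===== Notes on version B (the rewrite author's own statement) =====
-- stated objective: alternative
-- what changed: Replaces A's single pass that appends into a defaultdict (with a three-way sign/gcd branch) by a two-phase scheme: build a flat (normalized-key, asteroid) pair list using one uniform gcd normalization, then emit one filter pass per distinct first-occurrence key.
-- outside the precondition, e.g. on group_asteroids_by_direction([(0, 0), (1, 1)], 5): A raises IndexError, B raises IndexError; on group_asteroids_by_direction([(0, 0), (0, 0)], 0): A raises ZeroDivisionError, B raises ZeroDivisionError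
import Mathlib
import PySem

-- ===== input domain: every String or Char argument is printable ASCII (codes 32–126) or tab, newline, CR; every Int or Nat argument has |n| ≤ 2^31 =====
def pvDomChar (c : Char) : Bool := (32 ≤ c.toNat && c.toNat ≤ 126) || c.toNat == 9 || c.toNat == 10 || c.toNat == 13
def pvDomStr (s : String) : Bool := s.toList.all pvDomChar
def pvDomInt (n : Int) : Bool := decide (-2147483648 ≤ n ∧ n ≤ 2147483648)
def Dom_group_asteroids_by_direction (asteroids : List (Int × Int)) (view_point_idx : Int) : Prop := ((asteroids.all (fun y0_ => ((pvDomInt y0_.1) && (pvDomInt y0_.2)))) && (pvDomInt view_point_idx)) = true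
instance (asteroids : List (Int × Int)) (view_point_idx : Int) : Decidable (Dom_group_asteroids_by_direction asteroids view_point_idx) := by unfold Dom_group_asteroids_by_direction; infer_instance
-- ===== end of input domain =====

-- B replaces A's incremental defaultdict-append grouping by a two-phase pass (build (key, asteroid)
-- pairs with a uniform gcd normalization, then one filter pass per distinct key); alternative, not faster.

-- ===== PORT A =====
def group_asteroids_by_direction (asteroids : List (Int × Int)) (view_point_idx : Int) : List (Int × Int × List (Int × Int)) :=
  match PySem.List.pyGet? asteroids view_point_idx with
  | none => []  -- IndexError in Python; excluded by Pre_
  | some self =>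
    let d : PySem.Dict (Int × Int) (List (Int × Int)) :=
      (PySem.List.enumerate asteroids).foldl
        (fun d p =>
          if p.1 = view_point_idx then d
          else
            let dx := p.2.1 - self.1
            let dy := p.2.2 - self.2
            let key : Int × Int :=
              if dx = 0 then (dx, PySem.Int.floordiv dy |dy|)
              else if dy = 0 then (PySem.Int.floordiv dx |dx|, dy)
              else (PySem.Int.floordiv dx (Int.gcd dx dy), PySem.Int.floordiv dy (Int.gcd dx dy))
            -- asteroids[idx] is exactly the enumerated element p.2
            d.modify key [] (· ++ [p.2]))
        PySem.Dict.empty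
    d.items.map (fun q => (q.1.1, q.1.2, q.2))

-- ===== PORT B =====
def group_asteroids_by_direction_alt (asteroids : List (Int × Int)) (view_point_idx : Int) : List (Int × Int × List (Int × Int)) :=
  match PySem.List.pyGet? asteroids view_point_idx with
  | none => []  -- IndexError in Python; excluded by Pre_
  | some self =>
    let pairs : List ((Int × Int) × (Int × Int)) :=
      (PySem.List.enumerate asteroids).foldl
        (fun acc p =>
          if p.1 = view_point_idx then acc
          else
            let dx := p.2.1 - self.1
            let dy := p.2.2 - self.2
            let g : Int := Int.gcd dx dy
            acc ++ [((PySem.Int.floordiv dx g, PySem.Int.floordiv dy g), p.2)])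
        []
    let keys := PySem.List.dedup (pairs.map (·.1))   -- dict.fromkeys
    keys.map (fun k => (k.1, k.2, (pairs.filter (fun q => q.1 == k)).map (·.2)))

-- ===== PRECONDITION & SPEC =====
-- Pre_ excludes exactly the inputs on which Python A raises: an out-of-range view_point_idx
-- (IndexError) and a list in which another asteroid coincides with the viewpoint
-- (dx = dy = 0 makes A compute dy // abs(dy) = 0 // 0, ZeroDivisionError); a negative
-- view_point_idx also raises ZeroDivisionError, since enumerate's nonnegative idx never
-- equals it and the viewpoint entry itself is then processed with dx = dy = 0.
def Pre_group_asteroids_by_direction (asteroids : List (Int × Int)) (view_point_idx : Int) : Prop :=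
  0 ≤ view_point_idx ∧
  (match PySem.List.pyGet? asteroids view_point_idx with
   | none => false
   | some p => asteroids.count p == 1) = true
instance (asteroids : List (Int × Int)) (view_point_idx : Int) : Decidable (Pre_group_asteroids_by_direction asteroids view_point_idx) := by unfold Pre_group_asteroids_by_direction; infer_instance
def pvWitness_group_asteroids_by_direction : (List (Int × Int)) × Int := ([(0, 0), (1, 0), (2, 2)], 0)

def Spec_group_asteroids_by_direction (asteroids : List (Int × Int)) (view_point_idx : Int) (out : List (Int × Int × List (Int × Int))) : Prop := out = group_asteroids_by_direction_alt asteroids view_point_idx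
instance (asteroids : List (Int × Int)) (view_point_idx : Int) (out : List (Int × Int × List (Int × Int))) : Decidable (Spec_group_asteroids_by_direction asteroids view_point_idx out) := by unfold Spec_group_asteroids_by_direction; infer_instance

-- ===== CLAIM (what is proved, stated in full; the proofs are below) =====
def Claim_equal_group_asteroids_by_direction : Prop := ∀ (asteroids : List (Int × Int)) (view_point_idx : Int), Dom_group_asteroids_by_direction asteroids view_point_idx → Pre_group_asteroids_by_direction asteroids view_point_idx → Spec_group_asteroids_by_direction asteroids view_point_idx (group_asteroids_by_direction asteroids view_point_idx)

-- ===== LEMMAS AND PROOFS =====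

-- A loop that skips elements satisfying p is the loop over the filtered list.
theorem foldl_skip {α β : Type} (l : List α) (p : α → Prop) [DecidablePred p] (f : β → α → β) (init : β) :
    l.foldl (fun acc x => if p x then acc else f acc x) init
      = (l.filter (fun x => !decide (p x))).foldl f init := by
  induction l generalizing init with
  | nil => rfl
  | cons a t ih =>
    by_cases h : p a <;> simp [h, ih]

-- The three-way sign/gcd normalization of A equals the uniform gcd normalization of B.
theorem key_eq (dx dy : Int) :
    (if dx = 0 then (dx, PySem.Int.floordiv dy |dy|)
     else if dy = 0 then (PySem.Int.floordiv dx |dx|, dy)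
     else (PySem.Int.floordiv dx (Int.gcd dx dy), PySem.Int.floordiv dy (Int.gcd dx dy)))
    = ((PySem.Int.floordiv dx (Int.gcd dx dy), PySem.Int.floordiv dy (Int.gcd dx dy)) : Int × Int) := by
  by_cases hx : dx = 0
  · subst hx
    by_cases hy : dy = 0
    · subst hy; simp [PySem.Int.floordiv]
    · rw [if_pos rfl, Int.gcd_zero_left]
      simp [PySem.Int.floordiv, Int.zero_fdiv]
  · by_cases hy : dy = 0
    · subst hy
      rw [if_neg hx, if_pos rfl, Int.gcd_zero_right]
      simp [PySem.Int.floordiv, Int.zero_fdiv]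
    · rw [if_neg hx, if_neg hy]

theorem ports_agree (asteroids : List (Int × Int)) (view_point_idx : Int) :
    group_asteroids_by_direction asteroids view_point_idx
      = group_asteroids_by_direction_alt asteroids view_point_idx := by
  unfold group_asteroids_by_direction group_asteroids_by_direction_alt
  cases hg : PySem.List.pyGet? asteroids view_point_idx with
  | none => rfl
  | some self =>
    simp only []
    -- notation
    set E := PySem.List.enumerate asteroids with hE
    -- turn both skipping folds into folds over the filtered list
    rw [foldl_skip E (fun p => p.1 = view_point_idx),
        foldl_skip E (fun p => p.1 = view_point_idx)]
    set F := E.filter (fun p => !decide (p.1 = view_point_idx)) with hF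
    -- B's pairs list in closed form
    rw [PySem.List.foldl_append_singleton_eq_map]
    set L : List ((Int × Int) × (Int × Int)) :=
      F.map (fun p => ((PySem.Int.floordiv (p.2.1 - self.1) (Int.gcd (p.2.1 - self.1) (p.2.2 - self.2)),
                        PySem.Int.floordiv (p.2.2 - self.2) (Int.gcd (p.2.1 - self.1) (p.2.2 - self.2))), p.2)) with hL
    -- A's fold is the dict grouping fold over L
    have hfoldA :
        F.foldl (fun (d : PySem.Dict (Int × Int) (List (Int × Int))) p =>
            d.modify
              (if p.2.1 - self.1 = 0 then (p.2.1 - self.1, PySem.Int.floordiv (p.2.2 - self.2) |p.2.2 - self.2|)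
               else if p.2.2 - self.2 = 0 then (PySem.Int.floordiv (p.2.1 - self.1) |p.2.1 - self.1|, p.2.2 - self.2)
               else (PySem.Int.floordiv (p.2.1 - self.1) (Int.gcd (p.2.1 - self.1) (p.2.2 - self.2)),
                     PySem.Int.floordiv (p.2.2 - self.2) (Int.gcd (p.2.1 - self.1) (p.2.2 - self.2))))
              [] (· ++ [p.2])) PySem.Dict.empty
          = L.foldl (fun d q => d.modify q.1 [] (· ++ [q.2])) PySem.Dict.empty := by
      rw [hL, List.foldl_map]
      exact PySem.List.foldl_congr_mem _ _ _ _ (fun acc x _ => by rw [key_eq])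
    rw [hfoldA]
    set d := L.foldl (fun (d : PySem.Dict (Int × Int) (List (Int × Int))) q => d.modify q.1 [] (· ++ [q.2])) PySem.Dict.empty with hd
    have hkeys : d.keys = PySem.Set.ofList (L.map (·.1)) := by
      rw [hd]
      have := PySem.Dict.keys_foldl_modify_key L (fun q => q.1) []
        (fun _ q => (· ++ [q.2])) PySem.Dict.empty
      simpa [PySem.Set.update_nil_left] using this
    have hnodup : d.keys.Nodup := by rw [hkeys]; exact PySem.Set.nodup_ofList _
    have hgetD : ∀ k, d.getD k [] = (L.filter (fun q => q.1 == k)).map (·.2) := by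
      intro k
      rw [hd]
      simpa using PySem.Dict.getD_foldl_modify_append L PySem.Dict.empty k
    rw [PySem.Dict.items_eq_map_keys d hnodup [], hkeys, PySem.List.dedup_eq_ofList,
        List.map_map]
    refine List.map_congr_left (fun k _ => ?_)
    simp [hgetD k]

-- ===== VERDICT (by name: the statement is the Claim_ definition above) =====
theorem group_asteroids_by_direction_spec : Claim_equal_group_asteroids_by_direction := by
  intro asteroids view_point_idx _ _
  unfold Spec_group_asteroids_by_direction
  exact ports_agree asteroids view_point_idx
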